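-- pv_equiv track=rewrite | github.com/ZBuM1R4/Projeto-curso-Imers-o | app/services/repetition_analyzer.py | analyze_frequent_terms
-- ===== SOURCE A (Python) =====
-- from collections import Counter
--
-- STOPWORDS = {
--     "a", "o", "e", "é", "de", "do", "da", "dos", "das", "em", "um", "uma",
--     "para", "com", "no", "na", "nos", "nas", "por", "que", "eu", "meu",
--     "minha", "seu", "sua", "os", "as"
-- }
--
-- def normalize_text(text: str) -> list[str]:
--     texto = (
--         text.lower()
--         .replace(",", "")
--         .replace(".", "")
--         .replace("!", "")
--         .replace("?", "")
--         .replace(";", "")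
--         .replace(":", "")
--     )
--     return texto.split()
--
-- def analyze_frequent_terms(text: str, min_occurrences: int = 2) -> dict:
--     palavras = normalize_text(text)
--     palavras_filtradas = [
--         palavra for palavra in palavras
--         if palavra not in STOPWORDS and len(palavra) > 2
--     ]
--
--     contagem = Counter(palavras_filtradas)
--
--     return {
--         termo: qtd
--         for termo, qtd in contagem.items()
--         if qtd >= min_occurrences
--     }
-- ===== SOURCE B (Python) =====
-- STOPWORDS = {
--     "a", "o", "e", "é", "de", "do", "da", "dos", "das", "em", "um", "uma",
--     "para", "com", "no", "na", "nos", "nas", "por", "que", "eu", "meu",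
--     "minha", "seu", "sua", "os", "as"
-- }
--
-- def analyze_frequent_terms(text: str, min_occurrences: int = 2) -> dict:
--     # one fused streaming pass over the characters: build each word on the fly,
--     # skip punctuation, and count accepted words into the dict as they complete
--     counts = {}
--     word = []
--     for c in (text + " ").lower():
--         if c in ",.!?;:":
--             continue
--         if c.isspace():
--             if word:
--                 w = "".join(word)
--                 if w not in STOPWORDS and len(w) > 2:
--                     counts[w] = counts.get(w, 0) + 1
--                 word = []
--         else:
--             word.append(c)
--     return {w: n for w, n in counts.items() if n >= min_occurrences}
-- ===== Notes on version B (the rewrite author's own statement) =====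
-- stated objective: alternative
-- what changed: A's staged pipeline (six .replace() passes, .split(), a filtering list comprehension, Counter, then a dict comprehension) is replaced by one fused streaming scan over the characters: words are assembled on the fly, punctuation is skipped in-stream, and each completed non-stopword word of length > 2 is counted into the dict immediately, with only the final threshold filter left as a separate step.
import Mathlib
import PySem

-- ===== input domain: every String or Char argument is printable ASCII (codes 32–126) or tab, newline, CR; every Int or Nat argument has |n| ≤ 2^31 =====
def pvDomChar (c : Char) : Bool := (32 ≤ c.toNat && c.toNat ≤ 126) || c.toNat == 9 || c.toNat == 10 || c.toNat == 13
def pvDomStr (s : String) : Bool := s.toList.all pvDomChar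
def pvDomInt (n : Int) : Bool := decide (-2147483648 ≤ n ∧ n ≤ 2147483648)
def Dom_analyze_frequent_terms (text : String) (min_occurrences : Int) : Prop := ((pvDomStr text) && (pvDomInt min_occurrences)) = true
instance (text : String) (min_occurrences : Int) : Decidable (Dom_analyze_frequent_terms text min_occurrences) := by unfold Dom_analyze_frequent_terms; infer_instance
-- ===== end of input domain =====

-- B replaces A's staged pipeline (six .replace passes, split, filter list, Counter,
-- dict comprehension) by ONE fused streaming scan that assembles and counts words on the fly.

-- ===== PORT A =====
def pvSTOPWORDS : PySem.Set String := PySem.Set.ofList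
  ["a", "o", "e", "é", "de", "do", "da", "dos", "das", "em", "um", "uma",
   "para", "com", "no", "na", "nos", "nas", "por", "que", "eu", "meu",
   "minha", "seu", "sua", "os", "as"]

def normalize_text (text : String) : List String :=
  let texto :=
    PySem.Str.replace (PySem.Str.replace (PySem.Str.replace (PySem.Str.replace
      (PySem.Str.replace (PySem.Str.replace (PySem.Str.lower text) "," "") "." "")
      "!" "") "?" "") ";" "") ":" ""
  PySem.Str.split₀ texto

def analyze_frequent_terms (text : String) (min_occurrences : Int) : List (String × Int) :=
  let palavras := normalize_text text
  let palavras_filtradas := palavras.filter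
    (fun palavra => !(PySem.Set.contains pvSTOPWORDS palavra) && decide (2 < PySem.Str.len palavra))
  let contagem := PySem.Dict.counter palavras_filtradas
  (contagem.items.foldl
    (fun d p => if min_occurrences ≤ p.2 then d.insert p.1 p.2 else d)
    PySem.Dict.empty).items

-- ===== PORT B =====
def pvPUNCT : List Char := [',', '.', '!', '?', ';', ':']

-- the fused loop: state = (counts so far, characters of the word being built)
def pvScan : List Char → PySem.Dict String Int → List Char → PySem.Dict String Int
  | [], counts, _ => counts
  | c :: rest, counts, word =>
    if pvPUNCT.contains c then pvScan rest counts word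
    else if PySem.Chars.isspace c then
      if word.isEmpty then pvScan rest counts word
      else
        let w := String.ofList word
        pvScan rest
          (if !(PySem.Set.contains pvSTOPWORDS w) && decide (2 < PySem.Str.len w) then
            counts.insert w (counts.getD w 0 + 1)
          else counts) []
    else pvScan rest counts (word ++ [c])

def analyze_frequent_terms_alt (text : String) (min_occurrences : Int) : List (String × Int) :=
  let counts := pvScan (PySem.Chars.lower (text.toList ++ [' '])) PySem.Dict.empty []
  (counts.items.foldl
    (fun d p => if min_occurrences ≤ p.2 then d.insert p.1 p.2 else d)
    PySem.Dict.empty).items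

-- ===== PRECONDITION & SPEC =====
def Spec_analyze_frequent_terms (text : String) (min_occurrences : Int) (out : List (String × Int)) : Prop := out = analyze_frequent_terms_alt text min_occurrences
instance (text : String) (min_occurrences : Int) (out : List (String × Int)) : Decidable (Spec_analyze_frequent_terms text min_occurrences out) := by unfold Spec_analyze_frequent_terms; infer_instance

-- ===== CLAIM (what is proved, stated in full; the proofs are below) =====
def Claim_equal_analyze_frequent_terms : Prop := ∀ (text : String) (min_occurrences : Int), Dom_analyze_frequent_terms text min_occurrences → Spec_analyze_frequent_terms text min_occurrences (analyze_frequent_terms text min_occurrences)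

-- ===== LEMMAS AND PROOFS =====

def pvKeep (w : String) : Bool :=
  !(PySem.Set.contains pvSTOPWORDS w) && decide (2 < PySem.Str.len w)

def pvCountW (d : PySem.Dict String Int) (ws : List (List Char)) : PySem.Dict String Int :=
  ws.foldl (fun d w =>
    if pvKeep (String.ofList w) then
      d.insert (String.ofList w) (d.getD (String.ofList w) 0 + 1)
    else d) d

-- replace of a single character by "" is a character filter
theorem pv_replace_go_single (c : Char) : ∀ (fuel : Nat) (l acc : List Char), l.length ≤ fuel →
    PySem.Chars.replace.go [c] [] fuel l acc = acc.reverse ++ l.filter (fun x => x != c) := by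
  intro fuel
  induction fuel with
  | zero => intro l acc h; rw [PySem.Chars.replace.go]; simp at h; simp [h]
  | succ n ih =>
    intro l acc h
    cases l with
    | nil => rw [PySem.Chars.replace.go]; simp; omega
    | cons a t =>
      rw [PySem.Chars.replace.go]
      simp only [List.isPrefixOf, Bool.and_true]
      by_cases hac : c = a
      · subst hac
        simp [ih t acc (by simpa using Nat.le_of_succ_le_succ h)]
      · have hb : (c == a) = false := by simp [hac]
        simp [hb, ih t (a :: acc) (by simpa using Nat.le_of_succ_le_succ h),
          bne, Ne.symm hac]

theorem pv_replace_single (cs : List Char) (c : Char) :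
    PySem.Chars.replace cs [c] [] = cs.filter (fun x => x != c) := by
  rw [PySem.Chars.replace]
  simp [pv_replace_go_single c cs.length cs [] le_rfl]

-- A's six replace passes produce the punctuation-filtered lowered character list
theorem pv_norm_eq (text : String) :
    normalize_text text =
      PySem.Str.split₀ (String.ofList
        ((PySem.Chars.lower text.toList).filter (fun c => !(pvPUNCT.contains c)))) := by
  simp only [normalize_text]
  apply congrArg
  apply String.toList_inj.mp
  simp only [PySem.Str.toList_replace, PySem.Str.toList_lower,
    show ("," : String).toList = [','] from rfl, show ("." : String).toList = ['.'] from rfl,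
    show ("!" : String).toList = ['!'] from rfl, show ("?" : String).toList = ['?'] from rfl,
    show (";" : String).toList = [';'] from rfl, show (":" : String).toList = [':'] from rfl,
    show ("" : String).toList = [] from rfl]
  simp only [pv_replace_single, List.filter_filter]
  simp only [String.toList_ofList]
  apply List.filter_congr
  intro x _
  simp [pvPUNCT, bne]
  ac_rfl

-- split₀.go's word accumulator is a prefix of the output
theorem pv_split₀_go_acc : ∀ (cs cur : List Char) (acc : List (List Char)),
    PySem.Chars.split₀.go cs cur acc = acc.reverse ++ PySem.Chars.split₀.go cs cur [] := by
  intro cs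
  induction cs with
  | nil =>
    intro cur acc
    simp only [PySem.Chars.split₀.go]
    by_cases h : cur.isEmpty <;> simp [h]
  | cons c rest ih =>
    intro cur acc
    simp only [PySem.Chars.split₀.go]
    by_cases hs : PySem.Chars.isspace c
    · by_cases hc : cur.isEmpty
      · simp only [hs, hc, if_true]
        exact ih [] acc
      · simp only [hs, hc, if_true, Bool.false_eq_true, if_false]
        rw [ih [] (cur.reverse :: acc), ih [] [cur.reverse]]
        simp
    · simp only [hs, Bool.false_eq_true, if_false]
      exact ih (c :: cur) acc

-- the fused scan over lowered chars (with a trailing space) counts exactly the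
-- words that split₀ extracts from the punctuation-filtered stream
theorem pv_scan_eq : ∀ (cs : List Char) (d : PySem.Dict String Int) (word : List Char),
    pvScan (cs ++ [' ']) d word
      = pvCountW d (PySem.Chars.split₀.go
          (cs.filter (fun c => !(pvPUNCT.contains c))) word.reverse []) := by
  intro cs
  induction cs with
  | nil =>
    intro d word
    simp only [List.nil_append, List.filter_nil, pvScan, PySem.Chars.split₀.go]
    have hp : pvPUNCT.contains ' ' = false := by decide
    have hs : PySem.Chars.isspace ' ' = true := by decide
    simp only [hp, hs, if_true, Bool.false_eq_true, if_false]
    by_cases hw : word.isEmpty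
    · have : word = [] := by simpa using hw
      subst this
      simp [pvCountW]
    · have hwr : word.reverse.isEmpty = false := by
        cases word <;> simp_all
      simp only [hw, hwr, Bool.false_eq_true, if_false, List.reverse_reverse]
      simp [pvCountW, pvKeep]
  | cons c rest ih =>
    intro d word
    simp only [List.cons_append, pvScan, List.filter_cons]
    by_cases hp : c ∈ pvPUNCT
    · simp [hp, ih]
    · simp only [(by simpa using hp : pvPUNCT.contains c = false), Bool.not_false, if_true,
        Bool.false_eq_true, if_false]
      by_cases hs : PySem.Chars.isspace c
      · simp only [hs, if_true, PySem.Chars.split₀.go]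
        by_cases hw : word.isEmpty
        · have : word = [] := by simpa using hw
          subst this
          simp only [hw, if_true, ih]
          simp
        · have hwr : word.reverse.isEmpty = false := by
            cases word <;> simp_all
          simp only [hw, Bool.false_eq_true, if_false, ih]
          simp only [hwr, Bool.false_eq_true, if_false]
          rw [pv_split₀_go_acc _ [] [word.reverse.reverse]]
          simp [pvCountW, pvKeep]
      · simp only [hs, Bool.false_eq_true, if_false, ih]
        simp [PySem.Chars.split₀.go, hs]

-- counting during the scan = Counter of the filtered word list
theorem pv_countW_eq_counter (ws : List (List Char)) :
    pvCountW PySem.Dict.empty ws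
      = PySem.Dict.counter ((ws.map String.ofList).filter pvKeep) := by
  simp only [pvCountW]
  rw [PySem.List.foldl_ite_eq_foldl_filter (p := fun w => pvKeep (String.ofList w) = true)]
  rw [← PySem.Dict.foldl_insert_getD_add_one_eq_counter]
  rw [List.filter_map (f := String.ofList) (p := pvKeep)]
  rw [List.foldl_map]
  have hf : (fun x => decide (pvKeep (String.ofList x) = true)) = (pvKeep ∘ String.ofList) := by
    funext x; simp [Function.comp]
  rw [hf]

-- ===== VERDICT (by name: the statement is the Claim_ definition above) =====
theorem analyze_frequent_terms_spec : Claim_equal_analyze_frequent_terms := by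
  intro text min_occurrences _
  unfold Spec_analyze_frequent_terms analyze_frequent_terms analyze_frequent_terms_alt
  rw [pv_norm_eq]
  have hlow : PySem.Chars.lower (text.toList ++ [' '])
      = PySem.Chars.lower text.toList ++ [' '] := by
    simp [PySem.Chars.lower]
    decide
  rw [hlow, pv_scan_eq, pv_countW_eq_counter]
  have hsplit : PySem.Str.split₀ (String.ofList
      ((PySem.Chars.lower text.toList).filter (fun c => !(pvPUNCT.contains c))))
      = (PySem.Chars.split₀
          ((PySem.Chars.lower text.toList).filter (fun c => !(pvPUNCT.contains c)))).map
          String.ofList := by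
    have h := PySem.Str.split₀_map_toList (String.ofList
      ((PySem.Chars.lower text.toList).filter (fun c => !(pvPUNCT.contains c))))
    rw [String.toList_ofList] at h
    rw [← h, List.map_map]
    simp [Function.comp_def]
  rw [hsplit]
  rfl
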